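-- pv_equiv track=rewrite | github.com/reaktoro/reaktoro | utilities/supcrt-parser/parse-supcrt-slop07.py | parseElementalFormula
-- ===== SOURCE A (Python) =====
-- def parseElementalFormula(elemental_formula):
--     # Remove the trailing symbol (s) from the elemental formula of some minerals
--     elemental_formula = elemental_formula.replace('(s)', '')
--
--     # Split the elemental formula in words delimited by ( or )
--     words = elemental_formula.replace(')', '(').split('(')
--     words = [x for x in words if x != '']
--
--     # Check if the elemental formula contains only one element
--     if len(words) == 1:
--         return [(words[0], 1)]
--
--     # Collect the pairs (element, num_atoms) in the list elements
--     elements = []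
--     for i in range(0, len(words), 2):
--         if words[i] == '+' or words[i] == '-': # some formulas contain the suffix +(charge) or -(charge)
--             break
--         elements.append((words[i], int(words[i+1])))
--     return elements
-- ===== SOURCE B (Python) =====
-- def parseElementalFormula(elemental_formula):
--     # One pass over the characters: cut a token at every parenthesis.
--     tokens = []
--     cur = ''
--     for ch in elemental_formula.replace('(s)', ''):
--         if ch in '()':
--             if cur:
--                 tokens.append(cur)
--             cur = ''
--         else:
--             cur += ch
--     if cur:
--         tokens.append(cur)
--     if len(tokens) == 1:
--         return [(tokens[0], 1)]
--     elements = []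
--     it = iter(tokens)
--     for element, count in zip(it, it):
--         if element in ('+', '-'):
--             break
--         elements.append((element, int(count)))
--     return elements
-- ===== Notes on version B (the rewrite author's own statement) =====
-- stated objective: simpler
-- what changed: Replaces A's punctuation-rewriting replace+split pipeline and index-stepping range(0,n,2) loop with words[i]/words[i+1] subscripts by a single character scan that cuts a token at each parenthesis, followed by pairwise consumption of the token stream via zip(it, it).
import Mathlib
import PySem

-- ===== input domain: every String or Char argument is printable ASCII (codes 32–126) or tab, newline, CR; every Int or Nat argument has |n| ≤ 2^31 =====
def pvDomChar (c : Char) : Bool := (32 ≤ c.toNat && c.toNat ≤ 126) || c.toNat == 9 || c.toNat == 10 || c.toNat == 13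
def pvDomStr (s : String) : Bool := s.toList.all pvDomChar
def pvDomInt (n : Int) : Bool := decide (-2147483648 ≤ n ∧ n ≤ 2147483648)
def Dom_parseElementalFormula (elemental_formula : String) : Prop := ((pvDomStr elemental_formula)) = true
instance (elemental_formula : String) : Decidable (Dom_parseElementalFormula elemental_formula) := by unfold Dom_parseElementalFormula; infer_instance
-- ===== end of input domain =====

-- B rewrites A's replace/split/range(0,n,2) pipeline as one character scan plus pairwise
-- consumption of the token stream (objective: simpler); return values agree on all of Pre_.

-- ===== PORT A =====
-- the 'for i in range(0, len(words), 2)' loop; on IndexError/ValueError (A raises,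
-- excluded by Pre_) the port returns the bare accumulator
def pvAGo (words : List String) : List Int → List (String × Int) → List (String × Int)
  | [], acc => acc
  | i :: rest, acc =>
    match PySem.List.pyGet? words i with
    | none => acc
    | some w =>
      if w = "+" ∨ w = "-" then acc
      else
        match PySem.List.pyGet? words (i + 1) with
        | none => acc
        | some cnt =>
          match PySem.Int.ofStr? cnt with
          | none => acc
          | some n => pvAGo words rest (acc ++ [(w, n)])

def parseElementalFormula (elemental_formula : String) : List (String × Int) :=
  let s1 := PySem.Str.replace elemental_formula "(s)" ""
  let words0 := (PySem.Str.split? (PySem.Str.replace s1 ")" "(") "(").getD []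
  let words := words0.filter (fun x => x ≠ "")
  if words.length = 1 then
    [((PySem.List.pyGet? words 0).getD "", (1 : Int))]
  else
    pvAGo words (PySem.List.pyRange 0 (words.length : Int) 2) []

-- ===== PORT B =====
-- the character loop of Source B: state (tokens, cur); a parenthesis flushes cur
def pvTokStep (st : List (List Char) × List Char) (c : Char) : List (List Char) × List Char :=
  if c = '(' ∨ c = ')' then
    (if st.2 = [] then st.1 else st.1 ++ [st.2], [])
  else
    (st.1, st.2 ++ [c])

def pvBTokens (l : List Char) : List (List Char) :=
  let st := l.foldl pvTokStep ([], [])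
  if st.2 = [] then st.1 else st.1 ++ [st.2]

-- the 'for element, count in zip(it, it)' loop of Source B; on ValueError (Source B raises,
-- excluded by Pre_) the port returns []
def pvBPairs : List (List Char) → List (String × Int)
  | e :: n :: rest =>
    if e = ['+'] ∨ e = ['-'] then []
    else
      match PySem.Int.ofChars? n with
      | none => []
      | some k => (String.ofList e, k) :: pvBPairs rest
  | _ => []

def parseElementalFormula_alt (elemental_formula : String) : List (String × Int) :=
  let toks := pvBTokens (PySem.Str.replace elemental_formula "(s)" "").toList
  if toks.length = 1 then
    [((String.ofList (toks.headD [])), (1 : Int))]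
  else
    pvBPairs toks

-- ===== PRECONDITION & SPEC =====
-- character-level renaming of a closing to an opening parenthesis (what A's first replace does)
def pvPar (c : Char) : Char := if c = ')' then '(' else c

-- split on the opening-parenthesis character, recursively
def pvSChar : List Char → List (List Char)
  | [] => [[]]
  | c :: t =>
    if c = '(' then [] :: pvSChar t
    else
      match pvSChar t with
      | [] => [[c]]
      | h :: r => (c :: h) :: r

-- drop every (non-overlapping, left-to-right) occurrence of "(s)"
def pvStripS : List Char → List Char
  | '(' :: 's' :: ')' :: t => pvStripS t
  | c :: t => c :: pvStripS t
  | [] => []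

-- the nonempty words of the formula, delimited by parentheses (A's word list)
def pvWordsPre (s : String) : List (List Char) :=
  (pvSChar ((pvStripS s.toList).map pvPar)).filter (fun w => w ≠ [])

-- well-paired word list: each element word is followed by an int-parsable count word,
-- until an optional '+'/'-' charge word
def pvPairsOK : List (List Char) → Bool
  | [] => true
  | e :: rest =>
    if e = ['+'] ∨ e = ['-'] then true
    else
      match rest with
      | [] => false
      | n :: r => (PySem.Int.ofChars? n).isSome && pvPairsOK r

-- Pre_ excludes exactly the inputs where Python A raises: an element word with no following
-- count word (IndexError) or a count word int() rejects (ValueError)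
def Pre_parseElementalFormula (elemental_formula : String) : Prop :=
  (pvWordsPre elemental_formula).length = 1 ∨ pvPairsOK (pvWordsPre elemental_formula) = true
instance (elemental_formula : String) : Decidable (Pre_parseElementalFormula elemental_formula) := by
  unfold Pre_parseElementalFormula; infer_instance

def pvWitness_parseElementalFormula : String := "H(2)"

def Spec_parseElementalFormula (elemental_formula : String) (out : List (String × Int)) : Prop := out = parseElementalFormula_alt elemental_formula
instance (elemental_formula : String) (out : List (String × Int)) : Decidable (Spec_parseElementalFormula elemental_formula out) := by unfold Spec_parseElementalFormula; infer_instance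

-- ===== CLAIM (what is proved, stated in full; the proofs are below) =====
def Claim_equal_parseElementalFormula : Prop := ∀ (elemental_formula : String), Dom_parseElementalFormula elemental_formula → Pre_parseElementalFormula elemental_formula → Spec_parseElementalFormula elemental_formula (parseElementalFormula elemental_formula)

-- ===== LEMMAS AND PROOFS =====


def pvHeadCons (p : List Char) : List (List Char) → List (List Char)
  | [] => [p]
  | h :: r => (p ++ h) :: r

theorem pvSChar_ne_nil (l : List Char) : pvSChar l ≠ [] := by
  cases l with
  | nil => simp [pvSChar]
  | cons c t =>
    simp only [pvSChar]
    split
    · simp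
    · cases h : pvSChar t <;> simp

theorem pvHeadCons_nil (X : List (List Char)) (hX : X ≠ []) : pvHeadCons [] X = X := by
  cases X with
  | nil => exact absurd rfl hX
  | cons h r => simp [pvHeadCons]

theorem pvReplaceGo_single (fuel : Nat) :
    ∀ (l : List Char) (acc : List Char), l.length ≤ fuel →
      PySem.Chars.replace.go [')'] ['('] fuel l acc = acc.reverse ++ l.map pvPar := by
  induction fuel with
  | zero =>
    intro l acc h
    have : l = [] := List.eq_nil_of_length_eq_zero (Nat.le_zero.mp h)
    subst this
    simp [PySem.Chars.replace.go]
  | succ n ih =>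
    intro l acc h
    cases l with
    | nil => simp [PySem.Chars.replace.go]
    | cons c t =>
      simp only [PySem.Chars.replace.go]
      by_cases hc : c = ')'
      · subst hc
        have hpre : List.isPrefixOf [')'] (')' :: t) = true := by
          simp [List.isPrefixOf]
        rw [if_pos hpre]
        have ht : t.length ≤ n := by simpa using Nat.lt_succ_iff.mp (by simpa using h)
        simp only [List.length_cons, List.length_nil, List.drop_succ_cons, List.drop_zero]
        rw [ih t _ ht]
        simp [pvPar]
      · have hpre : List.isPrefixOf [')'] (c :: t) = false := by
          simp only [List.isPrefixOf, List.isPrefixOf_nil_left, Bool.and_true, beq_eq_false_iff_ne, ne_eq]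
          exact fun h => hc h.symm
        rw [if_neg (by simp [hpre])]
        have ht : t.length ≤ n := by simpa using Nat.lt_succ_iff.mp (by simpa [Nat.lt_succ_iff] using h)
        rw [ih t _ ht]
        simp [pvPar, hc]

theorem pvReplace_single (l : List Char) :
    PySem.Chars.replace l [')'] ['('] = l.map pvPar := by
  rw [PySem.Chars.replace]
  simp only [List.isEmpty_cons, if_false]
  simpa using pvReplaceGo_single l.length l [] le_rfl

theorem pvSplitGo_single (fuel : Nat) :
    ∀ (l cur : List Char) (acc : List (List Char)), l.length < fuel →
      PySem.Chars.splitOn.go ['('] fuel l cur acc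
        = acc.reverse ++ pvHeadCons cur.reverse (pvSChar l) := by
  induction fuel with
  | zero => intro l cur acc h; omega
  | succ n ih =>
    intro l cur acc h
    cases l with
    | nil => simp [PySem.Chars.splitOn.go, pvSChar, pvHeadCons]
    | cons c t =>
      simp only [PySem.Chars.splitOn.go]
      have ht : t.length < n := by simpa [Nat.succ_lt_succ_iff] using h
      by_cases hc : c = '('
      · subst hc
        have hpre : List.isPrefixOf ['('] ('(' :: t) = true := by
          simp [List.isPrefixOf]
        rw [if_pos hpre]
        simp only [List.length_cons, List.length_nil, List.drop_succ_cons, List.drop_zero]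
        rw [ih t [] _ ht]
        simp only [List.reverse_nil]
        rw [pvHeadCons_nil _ (pvSChar_ne_nil t)]
        simp [pvSChar, pvHeadCons]
      · have hpre : List.isPrefixOf ['('] (c :: t) = false := by
          simp only [List.isPrefixOf, List.isPrefixOf_nil_left, Bool.and_true, beq_eq_false_iff_ne, ne_eq]
          exact fun h => hc h.symm
        rw [if_neg (by simp [hpre])]
        rw [ih t (c :: cur) acc ht]
        simp only [pvSChar, hc, if_false]
        cases hS : pvSChar t with
        | nil => exact absurd hS (pvSChar_ne_nil t)
        | cons hh rr => simp [pvHeadCons]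

theorem pvSplitOn_single (l : List Char) :
    PySem.Chars.splitOn l ['('] = pvSChar l := by
  rw [PySem.Chars.splitOn]
  rw [pvSplitGo_single (l.length + 1) l [] [] (Nat.lt_succ_self _)]
  simp only [List.reverse_nil]
  rw [pvHeadCons_nil _ (pvSChar_ne_nil l)]
  simp

theorem pvFold_spec (l : List Char) :
    ∀ (ts : List (List Char)) (cur : List Char),
      (let st := l.foldl pvTokStep (ts, cur);
        if st.2 = [] then st.1 else st.1 ++ [st.2])
        = ts ++ (pvHeadCons cur (pvSChar (l.map pvPar))).filter (fun w => w ≠ []) := by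
  induction l with
  | nil =>
    intro ts cur
    by_cases hcur : cur = [] <;> simp [pvSChar, pvHeadCons, hcur]
  | cons c t ih =>
    intro ts cur
    by_cases hc : c = '(' ∨ c = ')'
    · have hpar : pvPar c = '(' := by
        rcases hc with h | h <;> simp [pvPar, h]
      simp only [List.foldl_cons, List.map_cons, hpar, pvTokStep, if_pos hc]
      rw [ih]
      rw [show pvSChar ('(' :: t.map pvPar) = [] :: pvSChar (t.map pvPar) by simp [pvSChar]]
      rw [pvHeadCons_nil _ (pvSChar_ne_nil _)]
      by_cases hcur : cur = []
      · simp [pvHeadCons, hcur]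
      · simp [pvHeadCons, hcur]
    · have hpar : pvPar c = c := by
        simp only [pvPar]
        rw [if_neg]
        intro h; exact hc (Or.inr h)
      simp only [List.foldl_cons, List.map_cons, hpar, pvTokStep, if_neg hc]
      rw [ih]
      have hcne : ¬ c = '(' := fun h => hc (Or.inl h)
      rw [show pvSChar (c :: t.map pvPar)
            = match pvSChar (t.map pvPar) with
              | [] => [[c]]
              | h :: r => (c :: h) :: r by simp [pvSChar, hcne]]
      cases hS : pvSChar (t.map pvPar) with
      | nil => exact absurd hS (pvSChar_ne_nil _)
      | cons hh rr => simp [pvHeadCons]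

theorem pvBTokens_spec (l : List Char) :
    pvBTokens l = (pvSChar (l.map pvPar)).filter (fun w => w ≠ []) := by
  have := pvFold_spec l [] []
  simpa [pvBTokens, pvHeadCons_nil _ (pvSChar_ne_nil _)] using this

theorem pvOfList_eq_empty (x : List Char) : String.ofList x = "" ↔ x = [] := by
  constructor
  · intro h
    have := congrArg String.toList h
    simpa using this
  · rintro rfl; rfl

theorem pvOfList_inj (x y : List Char) : String.ofList x = String.ofList y ↔ x = y := by
  constructor
  · intro h
    have := congrArg String.toList h
    simpa using this
  · rintro rfl; rfl

-- pairwise consumption on strings (the common shape of both loops)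
def pvPairsS : List String → List (String × Int)
  | e :: n :: rest =>
    if e = "+" ∨ e = "-" then []
    else
      match PySem.Int.ofStr? n with
      | none => []
      | some k => (e, k) :: pvPairsS rest
  | _ => []

theorem pvBPairs_map (L : List (List Char)) :
    pvBPairs L = pvPairsS (L.map String.ofList) := by
  have hplus : ∀ e : List Char, (String.ofList e = "+" ∨ String.ofList e = "-") ↔ (e = ['+'] ∨ e = ['-']) := by
    intro e
    rw [show ("+" : String) = String.ofList ['+'] from rfl,
        show ("-" : String) = String.ofList ['-'] from rfl,
        pvOfList_inj, pvOfList_inj]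
  match L with
  | [] => rfl
  | [e] => rfl
  | e :: n :: rest =>
    simp only [pvBPairs, pvPairsS, List.map_cons]
    rw [show PySem.Int.ofStr? (String.ofList n) = PySem.Int.ofChars? n by simp [PySem.Int.ofStr?]]
    by_cases hp : e = ['+'] ∨ e = ['-']
    · rw [if_pos hp, if_pos ((hplus e).mpr hp)]
    · rw [if_neg hp, if_neg (fun h => hp ((hplus e).mp h))]
      cases PySem.Int.ofChars? n with
      | none => rfl
      | some k => simp [pvBPairs_map rest]

theorem pvPyRange_two_nil (a b : Int) (h : b ≤ a) : PySem.List.pyRange a b 2 = [] := by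
  rw [PySem.List.pyRange]
  simp [show ¬ a < b by omega]

theorem pvPyRange_two_cons (a b : Int) (h : a < b) :
    PySem.List.pyRange a b 2 = a :: PySem.List.pyRange (a + 2) b 2 := by
  rw [PySem.List.pyRange, PySem.List.pyRange]
  simp only [show (0:Int) < 2 by norm_num, if_true, if_pos h, show (2:Int) ≠ 0 by norm_num, if_false]
  by_cases h2 : a + 2 < b
  · rw [if_pos h2]
    have hcount : (b - a + 2 - 1) / 2 = (b - (a + 2) + 2 - 1) / 2 + 1 := by
      rw [show b - a + 2 - 1 = (b - (a + 2) + 2 - 1) + 1 * 2 by ring]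
      rw [Int.add_mul_ediv_right _ _ (by norm_num : (2:Int) ≠ 0)]
    rw [hcount]
    have hnn : 0 ≤ (b - (a + 2) + 2 - 1) / 2 := by
      apply Int.ediv_nonneg <;> omega
    rw [Int.toNat_add hnn (by norm_num)]
    rw [show Int.toNat 1 = 1 from rfl]
    rw [List.range_succ_eq_map]
    simp only [List.map_cons, List.map_map, Nat.cast_zero, mul_zero, add_zero]
    congr 1
    apply List.map_congr_left
    intro k _
    simp only [Function.comp_apply]
    push_cast
    ring
  · rw [if_neg h2]
    have hcount : (b - a + 2 - 1) / 2 = 1 := by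
      have h1 : b - a = 1 ∨ b - a = 2 := by omega
      rcases h1 with h1 | h1 <;> rw [show b - a + 2 - 1 = b - a + 1 by ring, h1] <;> decide
    rw [hcount]
    simp

theorem pvAGo_spec (ws : List String) :
    ∀ (i : Nat) (acc : List (String × Int)),
      pvAGo ws (PySem.List.pyRange (i : Int) (ws.length : Int) 2) acc
        = acc ++ pvPairsS (ws.drop i) := by
  intro i
  induction hn : ws.length - i using Nat.strong_induction_on generalizing i with
  | _ n ihn =>
  intro acc
  by_cases hi : i < ws.length
  · rw [pvPyRange_two_cons _ _ (by exact_mod_cast hi)]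
    rw [pvAGo]
    rw [PySem.List.pyGet?_natCast ws i]
    rw [List.getElem?_eq_getElem hi]
    simp only [Option.some.injEq]
    have hdropi : ws.drop i = ws[i] :: ws.drop (i + 1) := List.drop_eq_getElem_cons hi
    by_cases hsign : ws[i] = "+" ∨ ws[i] = "-"
    · rw [if_pos hsign]
      rw [hdropi]
      cases hd1 : ws.drop (i + 1) with
      | nil => simp [pvPairsS]
      | cons n1 r1 =>
        simp only [pvPairsS, if_pos hsign, List.append_nil]
    · rw [if_neg hsign]
      rw [show ((i : Int) + 1) = ((i + 1 : Nat) : Int) by push_cast; ring]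
      rw [PySem.List.pyGet?_natCast ws (i + 1)]
      by_cases hi1 : i + 1 < ws.length
      · rw [List.getElem?_eq_getElem hi1]
        have hdropi1 : ws.drop (i + 1) = ws[i + 1] :: ws.drop (i + 2) :=
          List.drop_eq_getElem_cons hi1
        cases hof : PySem.Int.ofStr? ws[i + 1] with
        | none =>
          rw [hdropi, hdropi1]
          simp [pvPairsS, hsign, hof]
        | some k =>
          have hrec := ihn (ws.length - (i + 2)) (by omega) (i + 2) rfl (acc ++ [(ws[i], k)])
          push_cast at hrec
          rw [hdropi, hdropi1]
          simp [pvPairsS, hsign, hof, hrec]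
      · rw [List.getElem?_eq_none (by omega)]
        rw [hdropi]
        rw [List.drop_eq_nil_of_le (by omega)]
        simp [pvPairsS, hsign]
  · rw [pvPyRange_two_nil _ _ (by exact_mod_cast Nat.le_of_not_lt hi)]
    rw [List.drop_eq_nil_of_le (Nat.le_of_not_lt hi)]
    rw [pvAGo]
    simp [pvPairsS]

theorem pvWordsA_eq (s1 : String) :
    ((PySem.Str.split? (PySem.Str.replace s1 ")" "(") "(").getD []).filter (fun x => x ≠ "")
      = ((pvSChar (s1.toList.map pvPar)).filter (fun w => w ≠ [])).map String.ofList := by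
  rw [show PySem.Str.split? (PySem.Str.replace s1 ")" "(") "("
        = (PySem.Chars.split? (PySem.Str.replace s1 ")" "(").toList ['(']).map
            (List.map String.ofList) from by rfl]
  rw [show (PySem.Str.replace s1 ")" "(").toList
        = PySem.Chars.replace s1.toList [')'] ['('] from by
    simp [PySem.Str.replace]]
  rw [pvReplace_single]
  rw [PySem.Chars.split?]
  simp only [List.isEmpty_cons, Bool.false_eq_true, if_false, Option.map_some, Option.getD_some]
  rw [pvSplitOn_single]
  rw [List.filter_map]
  congr 1
  apply List.filter_congr
  intro w _
  simp [Function.comp, pvOfList_eq_empty]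

-- ===== VERDICT (by name: the statement is the Claim_ definition above) =====
theorem parseElementalFormula_spec : Claim_equal_parseElementalFormula := by
  intro s _hDom _hPre
  show parseElementalFormula s = parseElementalFormula_alt s
  simp only [parseElementalFormula, parseElementalFormula_alt]
  rw [pvWordsA_eq (PySem.Str.replace s "(s)" "")]
  rw [pvBTokens_spec (PySem.Str.replace s "(s)" "").toList]
  set T := (pvSChar (((PySem.Str.replace s "(s)" "").toList).map pvPar)).filter
      (fun w => w ≠ []) with hT
  by_cases hl : (T.map String.ofList).length = 1
  · rw [if_pos hl, if_pos (by simpa using hl)]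
    match T, hl with
    | [t], _ =>
      rw [show (0 : Int) = ((0 : Nat) : Int) by norm_num, PySem.List.pyGet?_natCast]
      simp
  · rw [if_neg hl, if_neg (by simpa using hl)]
    have h := pvAGo_spec (T.map String.ofList) 0 []
    push_cast at h
    simp only [List.drop_zero, List.nil_append] at h
    rw [h, pvBPairs_map T]
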